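-- pv_equiv track=rewrite | github.com/fenre/splunk-monitoring-use-cases | scripts/generate_clause_index.py | _coverage_state
-- ===== SOURCE A (Python) =====
-- from typing import Any, Dict, Iterable, List, Mapping, Optional, Tuple
--
-- def _coverage_state(entries: List[Mapping[str, Any]]) -> str:
--     """Derived label used by the Phase 2b ``clauseCoverageMatrix[]``.
--
--     ``covered-full``      - at least one UC with ``assurance=full`` and
--                             ``mode=satisfies``.
--     ``covered-partial``   - at least one UC with ``assurance=partial`` and
--                             ``mode=satisfies``.
--     ``contributing-only`` - at least one UC covers the clause but only at
--                             ``contributing`` assurance (or only via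
--                             ``detects-violation-of``).
--     ``uncovered``         - no UC tags the clause.
--     """
--     if not entries:
--         return "uncovered"
--     if any(
--         e.get("assurance") == "full" and e.get("mode") == "satisfies" for e in entries
--     ):
--         return "covered-full"
--     if any(
--         e.get("assurance") == "partial" and e.get("mode") == "satisfies" for e in entries
--     ):
--         return "covered-partial"
--     return "contributing-only"
-- ===== SOURCE B (Python) =====
-- def _coverage_state(entries):
--     """Single pass: decide on the first full+satisfies entry, otherwise track a partial flag."""
--     if not entries:
--         return "uncovered"
--     has_partial = False
--     for e in entries:
--         if e.get("mode") == "satisfies":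
--             a = e.get("assurance")
--             if a == "full":
--                 return "covered-full"
--             if a == "partial":
--                 has_partial = True
--     return "covered-partial" if has_partial else "contributing-only"
-- ===== Notes on version B (the rewrite author's own statement) =====
-- stated objective: alternative
-- what changed: Replaces the two separate any() scans with one early-returning pass that maintains a has_partial flag, preserving the full>partial>contributing priority.
import Mathlib
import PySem

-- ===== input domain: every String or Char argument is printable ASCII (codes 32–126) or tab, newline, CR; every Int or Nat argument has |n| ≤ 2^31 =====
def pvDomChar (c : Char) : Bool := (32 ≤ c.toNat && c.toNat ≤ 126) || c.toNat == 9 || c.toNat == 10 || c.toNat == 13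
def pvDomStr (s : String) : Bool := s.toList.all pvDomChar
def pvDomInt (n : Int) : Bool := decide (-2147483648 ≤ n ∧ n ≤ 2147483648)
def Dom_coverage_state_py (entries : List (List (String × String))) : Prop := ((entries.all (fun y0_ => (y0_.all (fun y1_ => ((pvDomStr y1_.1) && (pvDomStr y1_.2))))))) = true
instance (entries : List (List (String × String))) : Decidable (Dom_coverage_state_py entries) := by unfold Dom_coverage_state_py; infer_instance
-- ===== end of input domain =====

-- B replaces A's two any() scans by one early-returning pass with a has_partial flag (alternative decomposition; return value only).

-- ===== PORT A =====
-- e.get(k) on the dict (association list, first match)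
def egetA (e : List (String × String)) (k : String) : Option String :=
  (PySem.Dict.mk e).get? k

def coverage_state_py (entries : List (List (String × String))) : String :=
  if entries = [] then "uncovered"
  else if entries.any (fun e => egetA e "assurance" == some "full" && egetA e "mode" == some "satisfies") then
    "covered-full"
  else if entries.any (fun e => egetA e "assurance" == some "partial" && egetA e "mode" == some "satisfies") then
    "covered-partial"
  else "contributing-only"

-- ===== PORT B =====
-- e.get(k), first match
def egetB (e : List (String × String)) (k : String) : Option String :=
  (e.find? (fun p => p.1 == k)).map (·.2)

def loopB : List (List (String × String)) → Bool → String
  | [], hp => if hp then "covered-partial" else "contributing-only"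
  | e :: rest, hp =>
    if egetB e "mode" == some "satisfies" then
      if egetB e "assurance" == some "full" then "covered-full"
      else loopB rest (hp || (egetB e "assurance" == some "partial"))
    else loopB rest hp

def coverage_state_py_alt (entries : List (List (String × String))) : String :=
  if entries.isEmpty then "uncovered" else loopB entries false

-- ===== PRECONDITION & SPEC =====
def Spec_coverage_state_py (entries : List (List (String × String))) (out : String) : Prop := out = coverage_state_py_alt entries
instance (entries : List (List (String × String))) (out : String) : Decidable (Spec_coverage_state_py entries out) := by unfold Spec_coverage_state_py; infer_instance

-- ===== CLAIM (what is proved, stated in full; the proofs are below) =====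
def Claim_equal_coverage_state_py : Prop := ∀ (entries : List (List (String × String))), Dom_coverage_state_py entries → Spec_coverage_state_py entries (coverage_state_py entries)

-- ===== LEMMAS AND PROOFS =====

theorem eget_eq (e : List (String × String)) (k : String) : egetA e k = egetB e k := by
  induction e with
  | nil => rfl
  | cons p rest ih =>
    simp only [egetA, egetB, List.find?_cons] at *
    by_cases h : p.1 == k <;> simp [PySem.Dict.get?, h] at ih ⊢ <;> simpa [egetB] using ih

theorem loopB_eq (l : List (List (String × String))) (hp : Bool) :
    loopB l hp =
      if l.any (fun e => egetB e "assurance" == some "full" && egetB e "mode" == some "satisfies") then "covered-full"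
      else if hp || l.any (fun e => egetB e "assurance" == some "partial" && egetB e "mode" == some "satisfies") then "covered-partial"
      else "contributing-only" := by
  induction l generalizing hp with
  | nil => cases hp <;> simp [loopB]
  | cons e rest ih =>
    simp only [loopB, List.any_cons]
    by_cases hm : egetB e "mode" == some "satisfies"
    · by_cases hf : egetB e "assurance" == some "full"
      · simp [hm, hf]
      · simp only [hm, if_true, hf, if_false, ih]
        by_cases hp' : egetB e "assurance" == some "partial" <;>
          cases hp <;> simp [hm, hf, hp']
    · simp only [hm, if_false, ih]
      cases hp <;> simp [hm]

-- ===== VERDICT (by name: the statement is the Claim_ definition above) =====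
theorem coverage_state_py_spec : Claim_equal_coverage_state_py := by
  intro entries _
  unfold Spec_coverage_state_py coverage_state_py coverage_state_py_alt
  cases entries with
  | nil => rfl
  | cons e rest =>
    simp only [List.isEmpty_cons, if_false, Bool.false_eq_true, loopB_eq, Bool.false_or,
      reduceCtorEq, if_false, eget_eq]
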